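-- pv_equiv track=rewrite | github.com/ImOutOfBounds/Python-Challenges | ConvertDecimalToHex/main.py | findHex
-- ===== SOURCE A (Python) =====
-- hexSeq = ['A', 'B', 'C', 'D', 'E', 'F']
--
-- def findHex(ch):
--
--     isNum = True
--     j = 0
--     k = 0
--     l = 0
--
--     for i in ch:
--         if isNum:
--             val = j
--             j += 1
--         else:
--             val = hexSeq[k]
--             k += 1
--
--         ch[i] = [str(ch[i]), str(6 + l % 2) + str(val)]
--
--         if j == 10 or k == 6:
--             isNum = not isNum
--             j = 0
--             k = 0
--             l += 1
--
--     return ch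
-- ===== SOURCE B (Python) =====
-- hexSeq = ['A', 'B', 'C', 'D', 'E', 'F']
--
-- def findHex(ch):
--     for idx, key in enumerate(list(ch)):
--         m = idx % 16
--         label = '6' + str(m) if m < 10 else '7' + hexSeq[m - 10]
--         ch[key] = [str(ch[key]), label]
--     return ch
-- ===== Notes on version B (the rewrite author's own statement) =====
-- stated objective: simpler
-- what changed: B derives each label directly from the key's position (m = idx % 16; '6'+str(m) if m<10 else '7'+hexSeq[m-10]) via enumerate, eliminating A's isNum toggle and the j/k/l counters with their block-boundary reset logic.
import Mathlib
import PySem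

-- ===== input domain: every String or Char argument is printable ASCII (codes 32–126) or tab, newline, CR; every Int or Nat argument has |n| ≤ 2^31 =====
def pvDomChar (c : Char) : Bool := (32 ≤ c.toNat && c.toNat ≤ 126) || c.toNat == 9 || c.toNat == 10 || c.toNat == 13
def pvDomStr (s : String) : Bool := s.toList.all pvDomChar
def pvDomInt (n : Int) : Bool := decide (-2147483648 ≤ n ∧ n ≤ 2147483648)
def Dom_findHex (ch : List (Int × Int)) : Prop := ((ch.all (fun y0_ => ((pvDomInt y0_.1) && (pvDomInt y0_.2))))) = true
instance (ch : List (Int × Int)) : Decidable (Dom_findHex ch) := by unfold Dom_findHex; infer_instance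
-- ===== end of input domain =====

-- B replaces A's isNum toggle and j/k/l counters by deriving each label from the
-- key's position (idx % 16) with enumerate; objective: simpler. A mutates its dict
-- argument in place and B performs the same mutation; the theorems are about the
-- returned value.

-- ===== PORT A =====
def hexSeq : List String := ["A", "B", "C", "D", "E", "F"]

-- the for-loop of A: state (isNum, j, k, l), emitting one updated entry per key
def findHexAux (isNum : Bool) (j k l : Int) : List (Int × Int) → List (Int × List String)
  | [] => []
  | (key, v) :: rest =>
    -- if isNum: val = j; j += 1  else: val = hexSeq[k]; k += 1
    let valStr : String := if isNum then PySem.Int.toStr j else (PySem.List.pyGet? hexSeq k).getD ""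
    let j' : Int := if isNum then j + 1 else j
    let k' : Int := if isNum then k else k + 1
    -- ch[i] = [str(ch[i]), str(6 + l % 2) + str(val)]
    let entry : Int × List String :=
      (key, [PySem.Int.toStr v, PySem.Int.toStr (6 + PySem.Int.mod l 2) ++ valStr])
    -- if j == 10 or k == 6: toggle and reset
    if j' = 10 ∨ k' = 6 then entry :: findHexAux (!isNum) 0 0 (l + 1) rest
    else entry :: findHexAux isNum j' k' l rest

def findHex (ch : List (Int × Int)) : List (Int × List String) :=
  findHexAux true 0 0 0 ch

-- ===== PORT B =====
-- label = '6' + str(m) if m < 10 else '7' + hexSeq[m - 10], with m = idx % 16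
def hexLabel (idx : Int) : String :=
  let m := PySem.Int.mod idx 16
  if m < 10 then "6" ++ PySem.Int.toStr m
  else "7" ++ (PySem.List.pyGet? hexSeq (m - 10)).getD ""

def findHex_alt (ch : List (Int × Int)) : List (Int × List String) :=
  (PySem.List.enumerate ch).map (fun p => (p.2.1, [PySem.Int.toStr p.2.2, hexLabel p.1]))

-- ===== PRECONDITION & SPEC =====
def Spec_findHex (ch : List (Int × Int)) (out : List (Int × List String)) : Prop := out = findHex_alt ch
instance (ch : List (Int × Int)) (out : List (Int × List String)) : Decidable (Spec_findHex ch out) := by unfold Spec_findHex; infer_instance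

-- ===== CLAIM (what is proved, stated in full; the proofs are below) =====
def Claim_equal_findHex : Prop := ∀ (ch : List (Int × Int)), Dom_findHex ch → Spec_findHex ch (findHex ch)

-- ===== LEMMAS AND PROOFS =====

theorem toStr_six : PySem.Int.toStr 6 = "6" := by decide
theorem toStr_seven : PySem.Int.toStr 7 = "7" := by decide

theorem mod16_natCast (n : Nat) : PySem.Int.mod ((n : Int)) 16 = ((n % 16 : Nat) : Int) := by
  rw [PySem.Int.mod_eq_emod_of_pos (by norm_num)]; omega

theorem hexLabel_lt (n : Nat) (h : n % 16 < 10) :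
    hexLabel (n : Int) = "6" ++ PySem.Int.toStr ((n % 16 : Nat) : Int) := by
  rw [hexLabel, mod16_natCast, if_pos (by exact_mod_cast h)]

theorem hexLabel_ge (n : Nat) (h : 10 ≤ n % 16) :
    hexLabel (n : Int) = "7" ++ (PySem.List.pyGet? hexSeq (((n % 16 : Nat) : Int) - 10)).getD "" := by
  rw [hexLabel, mod16_natCast, if_neg (by omega)]

-- the loop invariant: at position n the state of A's loop is determined by n
theorem findHexAux_eq (ch : List (Int × Int)) : ∀ (n : Nat) (isNum : Bool) (j k l : Int),
    (if n % 16 < 10 then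
        isNum = true ∧ j = ((n % 16 : Nat) : Int) ∧ k = 0 ∧ l = 2 * ((n / 16 : Nat) : Int)
      else
        isNum = false ∧ j = 0 ∧ k = ((n % 16 : Nat) : Int) - 10 ∧ l = 2 * ((n / 16 : Nat) : Int) + 1) →
    findHexAux isNum j k l ch =
      (PySem.List.enumerate ch (n : Int)).map (fun p => (p.2.1, [PySem.Int.toStr p.2.2, hexLabel p.1])) := by
  induction ch with
  | nil => intro n isNum j k l _; simp [findHexAux, PySem.List.enumerate]
  | cons hd tl ih =>
    intro n isNum j k l hinv
    obtain ⟨key, v⟩ := hd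
    rw [PySem.List.enumerate_cons, List.map_cons]
    have hcast : ((n : Int) + 1) = ((n + 1 : Nat) : Int) := by push_cast; ring
    by_cases hr : n % 16 < 10
    · rw [if_pos hr] at hinv
      obtain ⟨hN, hj, hk, hl⟩ := hinv
      subst hN hj hk hl
      have hmod : PySem.Int.mod (2 * ((n / 16 : Nat) : Int)) 2 = 0 := by
        rw [PySem.Int.mod_eq_emod_of_pos (by norm_num)]; omega
      rw [hexLabel_lt n hr]
      by_cases h9 : n % 16 = 9
      · rw [findHexAux, if_pos (by simp only [if_true]; omega)]
        rw [ih (n + 1) _ _ _ _ (by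
          rw [if_neg (by omega)]
          refine ⟨rfl, rfl, by push_cast [Nat.add_mod_right]; omega, by push_cast; omega⟩)]
        simp only [hmod, hcast, if_true]
        norm_num [toStr_six]
      · rw [findHexAux, if_neg (by simp only [if_true]; omega)]
        rw [ih (n + 1) _ _ _ _ (by
          rw [if_pos (by omega)]
          refine ⟨rfl, by simp only [if_true]; push_cast; omega, rfl, by push_cast; omega⟩)]
        simp only [hmod, hcast, if_true]
        norm_num [toStr_six]
    · rw [if_neg hr] at hinv
      obtain ⟨hN, hj, hk, hl⟩ := hinv
      subst hN hj hk hl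
      have hmod : PySem.Int.mod (2 * ((n / 16 : Nat) : Int) + 1) 2 = 1 := by
        rw [PySem.Int.mod_eq_emod_of_pos (by norm_num)]; omega
      rw [hexLabel_ge n (by omega)]
      by_cases h15 : n % 16 = 15
      · rw [findHexAux, if_pos (by simp only [Bool.false_eq_true, if_false]; omega)]
        rw [ih (n + 1) _ _ _ _ (by
          rw [if_pos (by omega)]
          refine ⟨rfl, by push_cast; omega, rfl, by push_cast; omega⟩)]
        simp only [hmod, hcast, Bool.false_eq_true, if_false]
        norm_num [toStr_seven]
      · rw [findHexAux, if_neg (by simp only [Bool.false_eq_true, if_false]; omega)]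
        rw [ih (n + 1) _ _ _ _ (by
          rw [if_neg (by omega)]
          refine ⟨rfl, rfl, by simp only [Bool.false_eq_true, if_false]; push_cast [Nat.add_mod_right]; omega, by push_cast; omega⟩)]
        simp only [hmod, hcast, Bool.false_eq_true, if_false]
        norm_num [toStr_seven]

-- ===== VERDICT (by name: the statement is the Claim_ definition above) =====
theorem findHex_spec : Claim_equal_findHex := by
  intro ch _
  unfold Spec_findHex findHex findHex_alt
  have h := findHexAux_eq ch 0 true 0 0 0 (by norm_num)
  simpa using h
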